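-- pv_equiv track=rewrite | github.com/madeibao/PythonAlgorithm | PartC/Py原地删除一些元素.py | keeyone
-- ===== SOURCE A (Python) =====
-- def keeyone(A, num):
--     length = len(A)
--     idx = 0
--     for i in range(length):
--         if A[i] != num:
--             A[idx] = A[i]
--             idx += 1
--     return idx
-- ===== SOURCE B (Python) =====
-- def keeyone(A, num):
--     kept = [x for x in A if x != num]
--     A[:len(kept)] = kept
--     return len(kept)
-- ===== Notes on version B (the rewrite author's own statement) =====
-- stated objective: simpler
-- what changed: Replaces the interleaved two-pointer read/write loop by a single filter pass followed by one bulk slice write-back; the return value is the kept count.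
import Mathlib
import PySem

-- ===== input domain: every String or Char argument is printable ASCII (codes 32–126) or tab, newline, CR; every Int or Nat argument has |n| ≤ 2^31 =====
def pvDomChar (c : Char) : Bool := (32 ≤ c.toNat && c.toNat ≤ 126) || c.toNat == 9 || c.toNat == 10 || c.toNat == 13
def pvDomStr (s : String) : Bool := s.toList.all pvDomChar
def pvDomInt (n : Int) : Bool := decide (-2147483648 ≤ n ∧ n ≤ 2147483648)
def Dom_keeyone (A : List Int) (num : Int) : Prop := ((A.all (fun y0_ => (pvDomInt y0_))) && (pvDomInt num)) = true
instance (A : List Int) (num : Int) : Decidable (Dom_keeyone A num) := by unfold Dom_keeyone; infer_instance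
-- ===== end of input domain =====

-- B replaces A's interleaved two-pointer compaction loop by a filter pass plus one bulk
-- slice write-back (simpler); A mutates its argument in place and B performs the same
-- mutation — the equivalence proved here is about the RETURN value only.

-- ===== PORT A =====
-- two-pointer loop: state is (the mutated list, idx); reads A[i], writes A[idx]
def keeyone (A : List Int) (num : Int) : Int :=
  let length : Int := A.length
  let s :=
    (PySem.List.pyRange 0 length 1).foldl
      (fun (s : List Int × Int) (i : Int) =>
        let v := PySem.List.pyGetD s.1 i 0   -- A[i]; i ∈ range(len) is always in range
        if v ≠ num then (PySem.List.pySetD s.1 s.2 v, s.2 + 1) else s)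
      (A, 0)
  s.2

-- ===== PORT B =====
-- kept = [x for x in A if x != num]; return len(kept)  (the slice write-back does not
-- affect the return value)
def keeyone_alt (A : List Int) (num : Int) : Int :=
  let kept := A.filter (fun x => x ≠ num)
  (kept.length : Int)

-- ===== PRECONDITION & SPEC =====
def Spec_keeyone (A : List Int) (num : Int) (out : Int) : Prop := out = keeyone_alt A num
instance (A : List Int) (num : Int) (out : Int) : Decidable (Spec_keeyone A num out) := by unfold Spec_keeyone; infer_instance

-- ===== CLAIM (what is proved, stated in full; the proofs are below) =====
def Claim_equal_keeyone : Prop := ∀ (A : List Int) (num : Int), Dom_keeyone A num → Spec_keeyone A num (keeyone A num)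

-- ===== LEMMAS AND PROOFS =====

-- Loop invariant: after the first i steps, idx = count of kept elements so far, and the
-- positions ≥ i of the working list still hold the original values (all writes so far
-- were at positions < i because idx ≤ i throughout).
theorem keeyone_loop (L : List Int) (num : Int) :
    ∀ (m i : Nat) (lst : List Int) (idx : Int),
      m = L.length - i →
      lst.length = L.length → 0 ≤ idx → idx ≤ (i : Int) →
      (∀ k : Nat, i ≤ k → lst[k]? = L[k]?) →
      ((PySem.List.pyRange (i : Int) (L.length : Int) 1).foldl
        (fun (s : List Int × Int) (j : Int) =>
          let v := PySem.List.pyGetD s.1 j 0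
          if v ≠ num then (PySem.List.pySetD s.1 s.2 v, s.2 + 1) else s)
        (lst, idx)).2
        = idx + ((L.drop i).countP (fun x => x ≠ num) : Int) := by
  intro m
  induction m with
  | zero =>
      intro i lst idx hm hlen h0 hle hagree
      have hge : L.length ≤ i := by omega
      rw [PySem.List.pyRange_one_eq_nil (by exact_mod_cast hge)]
      simp [List.drop_eq_nil_of_le hge]
  | succ m ih =>
      intro i lst idx hm hlen h0 hle hagree
      have hit : i < L.length := by omega
      rw [PySem.List.pyRange_one_cons (by exact_mod_cast hit)]
      rw [List.foldl_cons]
      have hread : PySem.List.pyGetD lst (i : Int) 0 = L[i] := by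
        rw [PySem.List.pyGetD_natCast]
        have := hagree i (le_refl i)
        have hi' : i < lst.length := by omega
        simp [List.getD, List.getElem?_eq_getElem hi',
          List.getElem?_eq_getElem hit] at this ⊢
        exact this
      have hdrop : L.drop i = L[i] :: L.drop (i + 1) :=
        List.drop_eq_getElem_cons hit
      have hcast : (i : Int) + 1 = ((i + 1 : Nat) : Int) := by push_cast; ring
      by_cases hv : L[i] ≠ num
      · simp only [hread, hv, if_true, ne_eq, not_false_eq_true]
        rw [hcast]
        rw [ih (i + 1) (PySem.List.pySetD lst idx L[i]) (idx + 1) (by omega)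
          (by rw [PySem.List.pySetD_of_nonneg _ _ h0]; simpa using hlen)
          (by omega) (by push_cast; omega)
          ?_]
        · rw [hdrop, List.countP_cons_of_pos (pa := by simp [hv])]
          push_cast
          ring
        · intro k hk
          rw [PySem.List.pySetD_of_nonneg _ _ h0]
          rw [List.getElem?_set_ne (by omega)]
          exact hagree k (by omega)
      · simp only [hread, hv, ite_false, ne_eq]
        rw [hcast]
        rw [ih (i + 1) lst idx (by omega) hlen h0 (by push_cast; omega)
          (fun k hk => hagree k (by omega))]
        rw [hdrop]
        simp only [not_not] at hv
        rw [List.countP_cons_of_neg (pa := by simp [hv])]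

-- ===== VERDICT (by name: the statement is the Claim_ definition above) =====
theorem keeyone_spec : Claim_equal_keeyone := by
  intro A num _
  unfold Spec_keeyone keeyone keeyone_alt
  have h := keeyone_loop A num (A.length - 0) 0 A 0 rfl rfl (le_refl 0)
    (by norm_num) (fun k _ => rfl)
  simp only [Nat.cast_zero] at h
  rw [h]
  simp [List.countP_eq_length_filter]
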